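-- pv_equiv track=rewrite | github.com/suspectpart/id3vx | src/id3vx/binary.py | synchsafe
-- ===== SOURCE A (Python) =====
-- def synchsafe(integer):
--     out = 0
--     mask = 0x7F
--
--     while mask ^ 0x7FFFFFFF:
--         out = integer & ~mask
--         out <<= 1
--         out |= integer & mask
--         mask = ((mask + 1) << 8) - 1
--         integer = out
--
--     return out
-- ===== SOURCE B (Python) =====
-- def synchsafe(integer):
--     # Closed form: place each seven-bit group of the input at eight-bit spacing
--     # (group g shifted left by g positions; the remaining high part shifted by three).
--     return (integer % 128
--             + (integer // 2 ** 7 % 128) * 2 ** 8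
--             + (integer // 2 ** 14 % 128) * 2 ** 16
--             + (integer // 2 ** 21) * 2 ** 24)
-- ===== Notes on version B (the rewrite author's own statement) =====
-- stated objective: simpler
-- what changed: Replaced the three-iteration mask/shift/or insertion loop by a single closed-form arithmetic expression that extracts each seven-bit group with floor division and modulus and places it at eight-bit spacing (the remaining high part shifted left by three).
import Mathlib
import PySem

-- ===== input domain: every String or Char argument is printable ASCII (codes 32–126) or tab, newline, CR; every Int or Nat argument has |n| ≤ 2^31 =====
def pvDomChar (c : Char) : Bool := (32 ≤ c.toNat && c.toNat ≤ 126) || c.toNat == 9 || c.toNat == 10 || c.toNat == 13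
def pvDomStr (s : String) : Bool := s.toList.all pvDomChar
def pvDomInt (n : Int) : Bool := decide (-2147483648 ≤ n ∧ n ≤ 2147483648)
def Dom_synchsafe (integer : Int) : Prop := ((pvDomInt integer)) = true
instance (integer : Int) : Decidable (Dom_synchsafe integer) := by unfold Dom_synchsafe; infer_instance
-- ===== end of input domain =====

-- B replaces A's three-iteration mask/shift/or loop by one closed-form arithmetic
-- expression placing each seven-bit group at eight-bit spacing (objective: simpler).

-- ===== PORT A =====
-- A's while loop; the mask sequence 0x7F, 0x7FFF, 0x7FFFFF reaches 0x7FFFFFFF after 3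
-- iterations, so fuel 4 suffices on every input (the 4th call sees the guard false).
def synchsafeLoop : Nat → Int → Int → Int → Int
  | 0, out, _, _ => out
  | fuel+1, out, mask, integer =>
    if PySem.Int.bxor mask 0x7FFFFFFF ≠ 0 then
      let out' := PySem.Int.bor ((PySem.Int.band integer (Int.not mask)) <<< (1 : Nat))
                                 (PySem.Int.band integer mask)
      synchsafeLoop fuel out' (((mask + 1) <<< (8 : Nat)) - 1) out'
    else out

def synchsafe (integer : Int) : Int := synchsafeLoop 4 0 0x7F integer

-- ===== PORT B =====
def synchsafe_alt (integer : Int) : Int :=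
  PySem.Int.mod integer 128
  + PySem.Int.mod (PySem.Int.floordiv integer (2 ^ 7)) 128 * 2 ^ 8
  + PySem.Int.mod (PySem.Int.floordiv integer (2 ^ 14)) 128 * 2 ^ 16
  + PySem.Int.floordiv integer (2 ^ 21) * 2 ^ 24

-- ===== PRECONDITION & SPEC =====
def Spec_synchsafe (integer : Int) (out : Int) : Prop := out = synchsafe_alt integer
instance (integer : Int) (out : Int) : Decidable (Spec_synchsafe integer out) := by unfold Spec_synchsafe; infer_instance

-- ===== CLAIM (what is proved, stated in full; the proofs are below) =====
def Claim_equal_synchsafe : Prop := ∀ (integer : Int), Dom_synchsafe integer → Spec_synchsafe integer (synchsafe integer)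

-- ===== LEMMAS AND PROOFS =====

-- Nat layer ----------------------------------------------------------------

theorem nat_or_two_pow_mul (n q r : Nat) (h : r < 2 ^ n) :
    (2 ^ n * q) ||| r = 2 ^ n * q + r := by
  apply Nat.eq_of_testBit_eq
  intro j
  rw [Nat.testBit_or, Nat.testBit_two_pow_mul, Nat.testBit_two_pow_mul_add q h j]
  by_cases hj : j < n
  · simp [hj, Nat.not_le.mpr hj]
  · have hr : r.testBit j = false :=
      Nat.testBit_lt_two_pow (lt_of_lt_of_le h (Nat.pow_le_pow_right (by norm_num) (Nat.not_lt.mp hj)))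
    simp [hj, Nat.not_lt.mp hj, hr]

theorem nat_or_low (n r : Nat) (h : r < 2 ^ n) : r ||| (2 ^ n - 1) = 2 ^ n - 1 := by
  apply Nat.eq_of_testBit_eq
  intro j
  rw [Nat.testBit_or, Nat.testBit_two_pow_sub_one]
  by_cases hj : j < n
  · simp [hj]
  · have hr : r.testBit j = false :=
      Nat.testBit_lt_two_pow (lt_of_lt_of_le h (Nat.pow_le_pow_right (by norm_num) (Nat.not_lt.mp hj)))
    simp [hj, hr]

theorem nat_or_high (n w : Nat) :
    w ||| (2 ^ n - 1) = 2 ^ n * (w / 2 ^ n) + (2 ^ n - 1) := by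
  have hm : w % 2 ^ n < 2 ^ n := Nat.mod_lt _ (Nat.two_pow_pos n)
  have hw : w = 2 ^ n * (w / 2 ^ n) + w % 2 ^ n := (Nat.div_add_mod w (2 ^ n)).symm
  calc w ||| (2 ^ n - 1)
      = (2 ^ n * (w / 2 ^ n) ||| w % 2 ^ n) ||| (2 ^ n - 1) := by
        rw [nat_or_two_pow_mul _ _ _ hm, ← hw]
    _ = 2 ^ n * (w / 2 ^ n) ||| (w % 2 ^ n ||| (2 ^ n - 1)) := Nat.or_assoc _ _ _
    _ = 2 ^ n * (w / 2 ^ n) ||| (2 ^ n - 1) := by rw [nat_or_low _ _ hm]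
    _ = 2 ^ n * (w / 2 ^ n) + (2 ^ n - 1) := nat_or_two_pow_mul _ _ _ (by
        have := Nat.two_pow_pos n; omega)

theorem nat_and_ones (n w s : Nat) (hw : w % 2 ^ n = 2 ^ n - 1) (hs : s < 2 ^ n) :
    w &&& s = s := by
  calc w &&& s
      = w &&& (s &&& (2 ^ n - 1)) := by
        rw [Nat.and_two_pow_sub_one_eq_mod, Nat.mod_eq_of_lt hs]
    _ = (w &&& (2 ^ n - 1)) &&& s := by
        rw [Nat.and_comm s, ← Nat.and_assoc]
    _ = (2 ^ n - 1) &&& s := by rw [Nat.and_two_pow_sub_one_eq_mod, hw]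
    _ = s := by rw [Nat.and_comm, Nat.and_two_pow_sub_one_eq_mod, Nat.mod_eq_of_lt hs]

-- Int layer ----------------------------------------------------------------

theorem band_low_128 (u : Int) : PySem.Int.band u 127 = u % 128 := by
  by_cases hu : (0 : Int) ≤ u
  · rw [PySem.Int.band_of_nonneg hu (by norm_num)]
    rw [show ((127 : Int).toNat) = 2 ^ 7 - 1 from by decide, Nat.and_two_pow_sub_one_eq_mod]
    omega
  · simp only [PySem.Int.band]
    rw [if_neg hu, if_pos (by norm_num)]
    rw [show ((127 : Int).toNat) = 2 ^ 7 - 1 from by decide, Nat.and_comm, Nat.and_two_pow_sub_one_eq_mod]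
    omega

theorem band_high_128 (u : Int) : PySem.Int.band u (-128) = u - u % 128 := by
  by_cases hu : (0 : Int) ≤ u
  · simp only [PySem.Int.band]
    rw [if_pos hu, if_neg (by norm_num)]
    rw [show ((-(-128 : Int) - 1).toNat) = 2 ^ 7 - 1 from by decide, Nat.and_two_pow_sub_one_eq_mod]
    omega
  · simp only [PySem.Int.band]
    rw [if_neg hu, if_neg (by norm_num)]
    rw [show ((-(-128 : Int) - 1).toNat) = 2 ^ 7 - 1 from by decide, nat_or_high]
    omega

theorem bor_disj_256 (q r : Int) (h0 : 0 ≤ r) (h1 : r < 256) :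
    PySem.Int.bor (256 * q) r = 256 * q + r := by
  by_cases hq : (0 : Int) ≤ q
  · rw [PySem.Int.bor_of_nonneg (by omega : (0 : Int) ≤ 256 * q) h0]
    rw [show ((256 : Int) * q).toNat = 2 ^ 8 * q.toNat from by omega]
    rw [nat_or_two_pow_mul 8 q.toNat r.toNat (by omega)]
    omega
  · simp only [PySem.Int.bor]
    rw [if_neg (by omega : ¬ (0 : Int) ≤ 256 * q), if_pos h0]
    rw [nat_and_ones 8 (-(256 * q) - 1).toNat r.toNat (by omega) (by omega)]
    omega

theorem step_eq_128 (u : Int) :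
    PySem.Int.bor ((PySem.Int.band u (Int.not (127 : Int))) <<< (1 : Nat)) (PySem.Int.band u 127)
      = 2 * u - u % 128 := by
  rw [show Int.not (127 : Int) = -128 from by decide]
  rw [band_high_128, band_low_128, Int.shiftLeft_eq]
  rw [show (u - u % 128) * 2 ^ 1 = 256 * (u / 128) from by omega]
  rw [bor_disj_256 (u / 128) (u % 128) (by omega) (by omega)]
  omega

theorem band_low_32768 (u : Int) : PySem.Int.band u 32767 = u % 32768 := by
  by_cases hu : (0 : Int) ≤ u
  · rw [PySem.Int.band_of_nonneg hu (by norm_num)]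
    rw [show ((32767 : Int).toNat) = 2 ^ 15 - 1 from by decide, Nat.and_two_pow_sub_one_eq_mod]
    omega
  · simp only [PySem.Int.band]
    rw [if_neg hu, if_pos (by norm_num)]
    rw [show ((32767 : Int).toNat) = 2 ^ 15 - 1 from by decide, Nat.and_comm, Nat.and_two_pow_sub_one_eq_mod]
    omega

theorem band_high_32768 (u : Int) : PySem.Int.band u (-32768) = u - u % 32768 := by
  by_cases hu : (0 : Int) ≤ u
  · simp only [PySem.Int.band]
    rw [if_pos hu, if_neg (by norm_num)]
    rw [show ((-(-32768 : Int) - 1).toNat) = 2 ^ 15 - 1 from by decide, Nat.and_two_pow_sub_one_eq_mod]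
    omega
  · simp only [PySem.Int.band]
    rw [if_neg hu, if_neg (by norm_num)]
    rw [show ((-(-32768 : Int) - 1).toNat) = 2 ^ 15 - 1 from by decide, nat_or_high]
    omega

theorem bor_disj_65536 (q r : Int) (h0 : 0 ≤ r) (h1 : r < 65536) :
    PySem.Int.bor (65536 * q) r = 65536 * q + r := by
  by_cases hq : (0 : Int) ≤ q
  · rw [PySem.Int.bor_of_nonneg (by omega : (0 : Int) ≤ 65536 * q) h0]
    rw [show ((65536 : Int) * q).toNat = 2 ^ 16 * q.toNat from by omega]
    rw [nat_or_two_pow_mul 16 q.toNat r.toNat (by omega)]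
    omega
  · simp only [PySem.Int.bor]
    rw [if_neg (by omega : ¬ (0 : Int) ≤ 65536 * q), if_pos h0]
    rw [nat_and_ones 16 (-(65536 * q) - 1).toNat r.toNat (by omega) (by omega)]
    omega

theorem step_eq_32768 (u : Int) :
    PySem.Int.bor ((PySem.Int.band u (Int.not (32767 : Int))) <<< (1 : Nat)) (PySem.Int.band u 32767)
      = 2 * u - u % 32768 := by
  rw [show Int.not (32767 : Int) = -32768 from by decide]
  rw [band_high_32768, band_low_32768, Int.shiftLeft_eq]
  rw [show (u - u % 32768) * 2 ^ 1 = 65536 * (u / 32768) from by omega]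
  rw [bor_disj_65536 (u / 32768) (u % 32768) (by omega) (by omega)]
  omega

theorem band_low_8388608 (u : Int) : PySem.Int.band u 8388607 = u % 8388608 := by
  by_cases hu : (0 : Int) ≤ u
  · rw [PySem.Int.band_of_nonneg hu (by norm_num)]
    rw [show ((8388607 : Int).toNat) = 2 ^ 23 - 1 from by decide, Nat.and_two_pow_sub_one_eq_mod]
    omega
  · simp only [PySem.Int.band]
    rw [if_neg hu, if_pos (by norm_num)]
    rw [show ((8388607 : Int).toNat) = 2 ^ 23 - 1 from by decide, Nat.and_comm, Nat.and_two_pow_sub_one_eq_mod]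
    omega

theorem band_high_8388608 (u : Int) : PySem.Int.band u (-8388608) = u - u % 8388608 := by
  by_cases hu : (0 : Int) ≤ u
  · simp only [PySem.Int.band]
    rw [if_pos hu, if_neg (by norm_num)]
    rw [show ((-(-8388608 : Int) - 1).toNat) = 2 ^ 23 - 1 from by decide, Nat.and_two_pow_sub_one_eq_mod]
    omega
  · simp only [PySem.Int.band]
    rw [if_neg hu, if_neg (by norm_num)]
    rw [show ((-(-8388608 : Int) - 1).toNat) = 2 ^ 23 - 1 from by decide, nat_or_high]
    omega

theorem bor_disj_16777216 (q r : Int) (h0 : 0 ≤ r) (h1 : r < 16777216) :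
    PySem.Int.bor (16777216 * q) r = 16777216 * q + r := by
  by_cases hq : (0 : Int) ≤ q
  · rw [PySem.Int.bor_of_nonneg (by omega : (0 : Int) ≤ 16777216 * q) h0]
    rw [show ((16777216 : Int) * q).toNat = 2 ^ 24 * q.toNat from by omega]
    rw [nat_or_two_pow_mul 24 q.toNat r.toNat (by omega)]
    omega
  · simp only [PySem.Int.bor]
    rw [if_neg (by omega : ¬ (0 : Int) ≤ 16777216 * q), if_pos h0]
    rw [nat_and_ones 24 (-(16777216 * q) - 1).toNat r.toNat (by omega) (by omega)]
    omega

theorem step_eq_8388608 (u : Int) :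
    PySem.Int.bor ((PySem.Int.band u (Int.not (8388607 : Int))) <<< (1 : Nat)) (PySem.Int.band u 8388607)
      = 2 * u - u % 8388608 := by
  rw [show Int.not (8388607 : Int) = -8388608 from by decide]
  rw [band_high_8388608, band_low_8388608, Int.shiftLeft_eq]
  rw [show (u - u % 8388608) * 2 ^ 1 = 16777216 * (u / 8388608) from by omega]
  rw [bor_disj_16777216 (u / 8388608) (u % 8388608) (by omega) (by omega)]
  omega

theorem loop_succ (fuel : Nat) (out mask integer : Int)
    (h : PySem.Int.bxor mask 0x7FFFFFFF ≠ 0) :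
    synchsafeLoop (fuel + 1) out mask integer =
      synchsafeLoop fuel
        (PySem.Int.bor ((PySem.Int.band integer (Int.not mask)) <<< (1 : Nat)) (PySem.Int.band integer mask))
        (((mask + 1) <<< (8 : Nat)) - 1)
        (PySem.Int.bor ((PySem.Int.band integer (Int.not mask)) <<< (1 : Nat)) (PySem.Int.band integer mask)) := by
  simp [synchsafeLoop, h]

theorem loop_stop (fuel : Nat) (out mask integer : Int)
    (h : PySem.Int.bxor mask 0x7FFFFFFF = 0) :
    synchsafeLoop (fuel + 1) out mask integer = out := by
  simp [synchsafeLoop, h]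

theorem synchsafe_closed (v : Int) :
    synchsafe v =
      2 * (2 * (2 * v - v % 128) - (2 * v - v % 128) % 32768)
        - (2 * (2 * v - v % 128) - (2 * v - v % 128) % 32768) % 8388608 := by
  show synchsafeLoop (3 + 1) 0 127 v = _
  rw [loop_succ _ _ _ _ (by decide), step_eq_128,
      show (((127 : Int) + 1) <<< (8 : Nat)) - 1 = 32767 from by decide]
  show synchsafeLoop (2 + 1) _ _ _ = _
  rw [loop_succ _ _ _ _ (by decide), step_eq_32768,
      show (((32767 : Int) + 1) <<< (8 : Nat)) - 1 = 8388607 from by decide]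
  show synchsafeLoop (1 + 1) _ _ _ = _
  rw [loop_succ _ _ _ _ (by decide), step_eq_8388608,
      show (((8388607 : Int) + 1) <<< (8 : Nat)) - 1 = 2147483647 from by decide]
  show synchsafeLoop (0 + 1) _ _ _ = _
  rw [loop_stop _ _ _ _ (by decide)]

theorem synchsafe_alt_closed (v : Int) :
    synchsafe_alt v =
      v % 128 + (v / 128 % 128) * 256 + (v / 16384 % 128) * 65536 + (v / 2097152) * 16777216 := by
  unfold synchsafe_alt
  rw [PySem.Int.mod_eq_emod_of_pos (by norm_num),
      PySem.Int.mod_eq_emod_of_pos (by norm_num),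
      PySem.Int.mod_eq_emod_of_pos (by norm_num),
      PySem.Int.floordiv_eq_ediv_of_pos (by norm_num),
      PySem.Int.floordiv_eq_ediv_of_pos (by norm_num),
      PySem.Int.floordiv_eq_ediv_of_pos (by norm_num)]
  norm_num

-- ===== VERDICT (by name: the statement is the Claim_ definition above) =====
theorem synchsafe_spec : Claim_equal_synchsafe := by
  intro v _
  show synchsafe v = synchsafe_alt v
  rw [synchsafe_closed, synchsafe_alt_closed]
  have hdd1 : v / 128 / 128 = v / 16384 := by
    rw [Int.ediv_ediv_of_nonneg (by norm_num : (0 : Int) ≤ 128)]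
    norm_num
  have hdd2 : v / 16384 / 128 = v / 2097152 := by
    rw [Int.ediv_ediv_of_nonneg (by norm_num : (0 : Int) ≤ 16384)]
    norm_num
  omega
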